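-- pv_equiv track=rewrite | github.com/jonasschui/thesis | initial_DL/insights.py | get_unique_ne
-- ===== SOURCE A (Python) =====
-- def get_unique_ne(ne_list, othercat_lists):
-- 	other = set([j for i in othercat_lists for j in i])
-- 	unique_list = []
-- 	for item in ne_list:
-- 		if item in other:
-- 			continue
-- 		else:
-- 			unique_list.append(item)
-- 	return unique_list
-- ===== SOURCE B (Python) =====
-- def get_unique_ne(ne_list, othercat_lists):
-- 	remaining = list(ne_list)
-- 	for cat in othercat_lists:
-- 		cat_set = set(cat)
-- 		remaining = [x for x in remaining if x not in cat_set]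
-- 	return remaining
-- ===== Notes on version B (the rewrite author's own statement) =====
-- stated objective: alternative
-- what changed: B inverts the loop structure: instead of one pass over ne_list against a prebuilt flattened set of all categories, B loops over the categories and progressively filters the remaining list by each category's set (successive set-difference passes); order and duplicates are preserved because each pass is an order-preserving filter.
import Mathlib
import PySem

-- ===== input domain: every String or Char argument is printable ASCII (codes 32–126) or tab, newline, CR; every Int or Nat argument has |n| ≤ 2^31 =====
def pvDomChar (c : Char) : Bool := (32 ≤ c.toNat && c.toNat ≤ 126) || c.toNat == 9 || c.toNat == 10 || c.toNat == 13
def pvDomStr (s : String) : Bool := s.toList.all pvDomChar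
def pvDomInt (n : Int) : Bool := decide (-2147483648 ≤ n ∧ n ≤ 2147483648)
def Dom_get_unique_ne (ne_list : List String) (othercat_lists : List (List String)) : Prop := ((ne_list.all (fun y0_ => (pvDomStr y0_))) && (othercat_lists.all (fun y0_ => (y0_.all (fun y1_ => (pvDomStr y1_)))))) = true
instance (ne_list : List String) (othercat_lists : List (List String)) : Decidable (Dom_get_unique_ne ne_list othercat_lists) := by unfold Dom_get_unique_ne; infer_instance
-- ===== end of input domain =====

-- B inverts the loop structure: it iterates over the categories, filtering the remaining list by each category's set in turn, instead of A's single pass against one prebuilt flattened set (alternative decomposition, same cost class).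

-- ===== PORT A =====
def get_unique_ne (ne_list : List String) (othercat_lists : List (List String)) : List String :=
  let other : PySem.Set String :=
    PySem.Set.ofList (othercat_lists.foldl (fun acc i => acc ++ i) [])
  ne_list.foldl
    (fun unique_list item =>
      if PySem.Set.contains other item then unique_list else unique_list ++ [item])
    []

-- ===== PORT B =====
def get_unique_ne_alt (ne_list : List String) (othercat_lists : List (List String)) : List String :=
  othercat_lists.foldl
    (fun remaining cat =>
      let cat_set : PySem.Set String := PySem.Set.ofList cat
      remaining.filter (fun x => !(PySem.Set.contains cat_set x)))
    ne_list

-- ===== PRECONDITION & SPEC =====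
def Spec_get_unique_ne (ne_list : List String) (othercat_lists : List (List String)) (out : List String) : Prop := out = get_unique_ne_alt ne_list othercat_lists
instance (ne_list : List String) (othercat_lists : List (List String)) (out : List String) : Decidable (Spec_get_unique_ne ne_list othercat_lists out) := by unfold Spec_get_unique_ne; infer_instance

-- ===== CLAIM (what is proved, stated in full; the proofs are below) =====
def Claim_equal_get_unique_ne : Prop := ∀ (ne_list : List String) (othercat_lists : List (List String)), Dom_get_unique_ne ne_list othercat_lists → Spec_get_unique_ne ne_list othercat_lists (get_unique_ne ne_list othercat_lists)

-- ===== LEMMAS AND PROOFS =====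

theorem pv_mem_flatten_iff (othercat_lists : List (List String)) (x : String) :
    (x ∈ othercat_lists.foldl (fun acc i => acc ++ i) []) ↔
      othercat_lists.any (fun cat => cat.contains x) = true := by
  rw [PySem.List.foldl_append_eq_flatMap]
  simp

-- A's loop is a filter by the flattened-membership predicate
theorem pv_loop (P : String → Bool) (ne : List String) (acc : List String) :
    ne.foldl (fun u i => if P i then u else u ++ [i]) acc =
      acc ++ ne.filter (fun x => !P x) := by
  induction ne generalizing acc with
  | nil => simp
  | cons h t ih =>
    simp only [List.foldl, List.filter]
    by_cases hp : P h = true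
    · simp [hp, ih]
    · simp only [Bool.not_eq_true] at hp
      simp [hp, ih]

-- B's staged filtering equals one filter by "in no category"
theorem pv_staged (cats : List (List String)) (l : List String) :
    cats.foldl
      (fun remaining cat =>
        let cat_set : PySem.Set String := PySem.Set.ofList cat
        remaining.filter (fun x => !(PySem.Set.contains cat_set x)))
      l
    = l.filter (fun x => !(cats.any (fun cat => cat.contains x))) := by
  induction cats generalizing l with
  | nil => simp
  | cons c t ih =>
    simp only [List.foldl]
    rw [ih, List.filter_filter]
    apply List.filter_congr
    intro x _
    simp [Bool.and_comm]

theorem get_unique_ne_spec_aux (ne_list : List String) (othercat_lists : List (List String)) :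
    get_unique_ne ne_list othercat_lists = get_unique_ne_alt ne_list othercat_lists := by
  unfold get_unique_ne get_unique_ne_alt
  rw [pv_staged]
  show List.foldl _ [] ne_list = _
  have hfun : (fun (u : List String) item =>
      if PySem.Set.contains (PySem.Set.ofList (othercat_lists.foldl (fun acc i => acc ++ i) [])) item
      then u else u ++ [item]) =
      (fun u item => if othercat_lists.any (fun cat => cat.contains item) then u else u ++ [item]) := by
    funext u item
    have hb : PySem.Set.contains (PySem.Set.ofList (othercat_lists.foldl (fun acc i => acc ++ i) [])) item
        = othercat_lists.any (fun cat => cat.contains item) := by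
      rw [Bool.eq_iff_iff, PySem.Set.contains_iff, PySem.Set.mem_ofList, pv_mem_flatten_iff]
    rw [hb]
  rw [hfun, pv_loop]
  simp

-- ===== VERDICT (by name: the statement is the Claim_ definition above) =====
theorem get_unique_ne_spec : Claim_equal_get_unique_ne := by
  intro ne_list othercat_lists _
  exact get_unique_ne_spec_aux ne_list othercat_lists
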